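-- pv_equiv track=rewrite | github.com/Mlaiel/Spotify-AI-Agent-Backend | backend/app/tenancy/fixtures/templates/examples/config/tenant_templates/configs/environments/dev/manifests/monitoring/alerts/templates/alertmanager/receivers/templates/slack/locales/tools/templates/warning/locales/data/format_handlers.py | _translate_month_names_de
-- ===== SOURCE A (Python) =====
-- def _translate_month_names_de(formatted: str) -> str:
--     """Traduit les noms de mois en allemand"""
--     translations = {
--         'January': 'Januar', 'February': 'Februar', 'March': 'März',
--         'April': 'April', 'May': 'Mai', 'June': 'Juni',
--         'July': 'Juli', 'August': 'August', 'September': 'September',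
--         'October': 'Oktober', 'November': 'November', 'December': 'Dezember'
--     }
--
--     for en, de in translations.items():
--         formatted = formatted.replace(en, de)
--
--     return formatted
-- ===== SOURCE B (Python) =====
-- def _translate_month_names_de(formatted: str) -> str:
--     """Traduit les noms de mois en allemand (single left-to-right scan)."""
--     translations = {
--         'January': 'Januar', 'February': 'Februar', 'March': 'März',
--         'April': 'April', 'May': 'Mai', 'June': 'Juni',
--         'July': 'Juli', 'August': 'August', 'September': 'September',
--         'October': 'Oktober', 'November': 'November', 'December': 'Dezember'
--     }
--     out = []
--     i = 0
--     n = len(formatted)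
--     while i < n:
--         for en, de in translations.items():
--             if formatted.startswith(en, i):
--                 out.append(de)
--                 i += len(en)
--                 break
--         else:
--             out.append(formatted[i])
--             i += 1
--     return ''.join(out)
-- ===== Notes on version B (the rewrite author's own statement) =====
-- stated objective: alternative
-- what changed: B replaces A's 12 sequential full-string replace passes by a single left-to-right scan that, at each position, takes the first matching month name from the table and copies the translation.
import Mathlib
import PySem

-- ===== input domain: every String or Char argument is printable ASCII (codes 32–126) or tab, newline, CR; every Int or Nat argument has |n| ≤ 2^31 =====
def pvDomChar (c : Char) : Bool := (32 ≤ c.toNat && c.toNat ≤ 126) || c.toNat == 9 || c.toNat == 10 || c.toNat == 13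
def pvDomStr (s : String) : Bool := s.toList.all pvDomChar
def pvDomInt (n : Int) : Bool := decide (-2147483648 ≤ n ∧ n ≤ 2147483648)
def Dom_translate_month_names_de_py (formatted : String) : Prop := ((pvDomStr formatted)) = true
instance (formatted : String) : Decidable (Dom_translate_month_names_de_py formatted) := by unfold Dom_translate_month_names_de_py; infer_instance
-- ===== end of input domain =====

-- B replaces A's 12 sequential full-string replace passes by a single left-to-right
-- scan taking the first matching month name at each position (objective: alternative).

-- ===== PORT A =====
-- the dict literal of A, as an association list in insertion order
def aTable : List (String × String) :=
  [("January", "Januar"), ("February", "Februar"), ("March", "März"),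
   ("April", "April"), ("May", "Mai"), ("June", "Juni"),
   ("July", "Juli"), ("August", "August"), ("September", "September"),
   ("October", "Oktober"), ("November", "November"), ("December", "Dezember")]

-- 'for en, de in translations.items(): formatted = formatted.replace(en, de)'
def translate_month_names_de_py (formatted : String) : String :=
  aTable.foldl (fun acc p => PySem.Str.replace acc p.1 p.2) formatted

-- ===== PORT B =====
-- the same dict literal; B's scanner works over the character list, so the
-- pairs are stored as character lists
def bTable : List (List Char × List Char) :=
  [(['J', 'a', 'n', 'u', 'a', 'r', 'y'], ['J', 'a', 'n', 'u', 'a', 'r']),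
   (['F', 'e', 'b', 'r', 'u', 'a', 'r', 'y'], ['F', 'e', 'b', 'r', 'u', 'a', 'r']),
   (['M', 'a', 'r', 'c', 'h'], ['M', 'ä', 'r', 'z']),
   (['A', 'p', 'r', 'i', 'l'], ['A', 'p', 'r', 'i', 'l']),
   (['M', 'a', 'y'], ['M', 'a', 'i']),
   (['J', 'u', 'n', 'e'], ['J', 'u', 'n', 'i']),
   (['J', 'u', 'l', 'y'], ['J', 'u', 'l', 'i']),
   (['A', 'u', 'g', 'u', 's', 't'], ['A', 'u', 'g', 'u', 's', 't']),
   (['S', 'e', 'p', 't', 'e', 'm', 'b', 'e', 'r'], ['S', 'e', 'p', 't', 'e', 'm', 'b', 'e', 'r']),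
   (['O', 'c', 't', 'o', 'b', 'e', 'r'], ['O', 'k', 't', 'o', 'b', 'e', 'r']),
   (['N', 'o', 'v', 'e', 'm', 'b', 'e', 'r'], ['N', 'o', 'v', 'e', 'm', 'b', 'e', 'r']),
   (['D', 'e', 'c', 'e', 'm', 'b', 'e', 'r'], ['D', 'e', 'z', 'e', 'm', 'b', 'e', 'r'])]

-- Source B's while loop: at position i, the for-else takes the FIRST table entry whose
-- key starts here (find?); on a match of length L it emits the value and advances by
-- L (here: one char consumed by the pattern plus 'drop (L-1)', exact since every key
-- is nonempty); otherwise it copies one character.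
def bGo : List Char → List Char
  | [] => []
  | c :: t =>
    match bTable.find? (fun p => p.1.isPrefixOf (c :: t)) with
    | some p => p.2 ++ bGo (t.drop (p.1.length - 1))
    | none => c :: bGo t
termination_by s => s.length
decreasing_by all_goals simp

-- ''.join(out)
def translate_month_names_de_py_alt (formatted : String) : String :=
  String.ofList (bGo formatted.toList)

-- ===== PRECONDITION & SPEC =====
def Spec_translate_month_names_de_py (formatted : String) (out : String) : Prop := out = translate_month_names_de_py_alt formatted
instance (formatted : String) (out : String) : Decidable (Spec_translate_month_names_de_py formatted out) := by unfold Spec_translate_month_names_de_py; infer_instance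

-- ===== CLAIM (what is proved, stated in full; the proofs are below) =====
def Claim_equal_translate_month_names_de_py : Prop := ∀ (formatted : String), Dom_translate_month_names_de_py formatted → Spec_translate_month_names_de_py formatted (translate_month_names_de_py formatted)

-- ===== LEMMAS AND PROOFS =====

-- capital ASCII letter
def isCap (c : Char) : Bool := 'A' ≤ c && c ≤ 'Z'

-- recursive characterisation of Python's str.replace (for a nonempty pattern)
def rep (old new : List Char) : List Char → List Char
  | [] => []
  | c :: t =>
    if old.isPrefixOf (c :: t) then new ++ rep old new (t.drop (old.length - 1))
    else c :: rep old new t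
termination_by s => s.length
decreasing_by all_goals simp

lemma goEq (old new : List Char) (ho : old ≠ []) :
    ∀ fuel l acc, l.length ≤ fuel →
      PySem.Chars.replace.go old new fuel l acc = acc.reverse ++ rep old new l := by
  intro fuel
  induction fuel with
  | zero =>
    intro l acc hl
    have : l = [] := List.eq_nil_of_length_eq_zero (Nat.le_zero.mp hl)
    subst this
    simp [PySem.Chars.replace.go, rep]
  | succ n ih =>
    intro l acc hl
    cases l with
    | nil => simp [PySem.Chars.replace.go, rep]
    | cons c t =>
      rw [PySem.Chars.replace.go]
      by_cases hp : old.isPrefixOf (c :: t) = true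
      · obtain ⟨o, old', rfl⟩ : ∃ o old', old = o :: old' := by
          cases old with
          | nil => exact absurd rfl ho
          | cons o old' => exact ⟨o, old', rfl⟩
        rw [if_pos hp]
        have hdrop : List.drop (o :: old').length (c :: t) = t.drop ((o :: old').length - 1) := by
          simp
        rw [hdrop, ih _ _ (by simp at hl ⊢; omega)]
        rw [rep, if_pos hp]
        simp
      · rw [if_neg hp, ih _ _ (by simp at hl ⊢; omega)]
        rw [rep, if_neg hp]
        simp

lemma replace_eq_rep (s old new : List Char) (ho : old ≠ []) :
    PySem.Chars.replace s old new = rep old new s := by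
  rw [PySem.Chars.replace, if_neg (by simp [List.isEmpty_iff, ho])]
  simpa using goEq old new ho s.length s [] le_rfl

lemma rep_nil (old new : List Char) : rep old new [] = [] := by simp [rep]

-- a mismatch of a and b at some common position (bounded, Bool)
def mismB (a b : List Char) : Bool :=
  (List.range (min a.length b.length)).any (fun m => a.getD m ' ' != b.getD m ' ')

-- structure of every table pair: both components nonempty, capital first letter,
-- no capital after it
def Struct (p : List Char × List Char) : Prop :=
  p.1 ≠ [] ∧ p.2 ≠ [] ∧ isCap (p.1.headD 'a') = true ∧ isCap (p.2.headD 'a') = true ∧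
  (∀ c ∈ p.1.tail, isCap c = false) ∧ (∀ c ∈ p.2.tail, isCap c = false)

lemma not_prefix_of_mismB (a b w : List Char) (h : mismB a b = true) :
    a.isPrefixOf (b ++ w) = false := by
  rw [Bool.eq_false_iff]
  intro hp
  obtain ⟨m, hm, hne⟩ := List.any_eq_true.mp h
  rw [List.mem_range, lt_min_iff] at hm
  rw [bne_iff_ne] at hne
  obtain ⟨tl, htl⟩ := List.isPrefixOf_iff_prefix.mp hp
  apply hne
  have h1 : (a ++ tl)[m]? = a[m]? := List.getElem?_append_left hm.1
  have h2 : (b ++ w)[m]? = b[m]? := List.getElem?_append_left hm.2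
  rw [htl] at h1
  have := h1.symm.trans h2
  rw [List.getD_eq_getElem?_getD, List.getD_eq_getElem?_getD, this]

-- skipping a block of non-capital characters
lemma rep_append_noncap (o : Char) (old' new u w : List Char)
    (hcap : isCap o = true) (hu : ∀ c ∈ u, isCap c = false) :
    rep (o :: old') new (u ++ w) = u ++ rep (o :: old') new w := by
  induction u with
  | nil => simp
  | cons c u' ih =>
    have hoc : (o == c) = false := by
      rw [beq_eq_false_iff_ne]
      intro e
      rw [e] at hcap
      rw [hu c (List.mem_cons_self)] at hcap
      exact Bool.false_ne_true hcap
    have hnp : (o :: old').isPrefixOf (c :: (u' ++ w)) = false := by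
      simp [List.isPrefixOf, hoc]
    rw [List.cons_append, rep, if_neg (by simp [hnp]), ih (fun x hx => hu x (List.mem_cons_of_mem _ hx))]
    simp

-- the pattern itself at the front is replaced
lemma rep_self_append (old new w : List Char) (ho : old ≠ []) :
    rep old new (old ++ w) = new ++ rep old new w := by
  obtain ⟨o, old', rfl⟩ : ∃ o old', old = o :: old' := by
    cases old with
    | nil => exact absurd rfl ho
    | cons o old' => exact ⟨o, old', rfl⟩
  have hp : (o :: old').isPrefixOf (o :: old' ++ w) = true :=
    List.isPrefixOf_iff_prefix.mpr ⟨w, by simp⟩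
  rw [List.cons_append, rep, if_pos (by exact hp)]
  simp

-- replacement never creates a fresh all-non-capital prefix: if t' (no capitals)
-- is a prefix of the replaced string, it already was a prefix
lemma rep_prefix_mono (old new : List Char) (hn : new ≠ [])
    (hncap : isCap (new.headD 'a') = true) :
    ∀ n w t', w.length ≤ n → (∀ c ∈ t', isCap c = false) →
      t' <+: rep old new w → t' <+: w := by
  intro n
  induction n with
  | zero =>
    intro w t' hw _ hpre
    have : w = [] := List.eq_nil_of_length_eq_zero (Nat.le_zero.mp hw)
    subst this
    rw [rep_nil] at hpre
    exact hpre
  | succ n ih =>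
    intro w t' hw hcap hpre
    cases w with
    | nil =>
      rw [rep_nil] at hpre
      exact hpre
    | cons c t =>
      cases t' with
      | nil => exact List.nil_prefix
      | cons d t'' =>
        by_cases hp : old.isPrefixOf (c :: t) = true
        · exfalso
          rw [rep, if_pos hp] at hpre
          obtain ⟨nh, new', rfl⟩ : ∃ nh new', new = nh :: new' := by
            cases new with
            | nil => exact absurd rfl hn
            | cons nh new' => exact ⟨nh, new', rfl⟩
          rw [List.cons_append] at hpre
          have hd : d = nh := ((List.cons_prefix_cons).mp hpre).1
          have : isCap d = false := hcap d (List.mem_cons_self)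
          rw [hd] at this
          simp at hncap
          rw [hncap] at this
          exact absurd this (by decide)
        · rw [rep, if_neg hp] at hpre
          obtain ⟨hd, hpre'⟩ := (List.cons_prefix_cons).mp hpre
          have : t'' <+: t :=
            ih t t'' (by simp at hw; omega)
              (fun x hx => hcap x (List.mem_cons_of_mem _ hx)) hpre'
          exact (List.cons_prefix_cons).mpr ⟨hd, this⟩

-- the sequential-replace composition, over character lists
def afold (ps : List (List Char × List Char)) (s : List Char) : List Char :=
  ps.foldl (fun l p => rep p.1 p.2 l) s

lemma afold_nil (ps : List (List Char × List Char)) : afold ps [] = [] := by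
  induction ps with
  | nil => rfl
  | cons p ps ih => simp [afold, rep_nil] at ih ⊢; exact ih

lemma afold_append (ps qs : List (List Char × List Char)) (s : List Char) :
    afold (ps ++ qs) s = afold qs (afold ps s) := by
  simp [afold, List.foldl_append]

-- when no key matches at the front, the whole composition keeps the first char
lemma afold_cons (ps : List (List Char × List Char)) (c : Char) (t : List Char)
    (hs : ∀ p ∈ ps, Struct p)
    (hnp : ∀ p ∈ ps, p.1.isPrefixOf (c :: t) = false) :
    afold ps (c :: t) = c :: afold ps t := by
  induction ps generalizing t with
  | nil => rfl
  | cons q ps' ih =>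
    have hq := hs q (List.mem_cons_self)
    have hrepq : rep q.1 q.2 (c :: t) = c :: rep q.1 q.2 t := by
      rw [rep, if_neg (by simp [hnp q (List.mem_cons_self)])]
    have hnp' : ∀ p ∈ ps', p.1.isPrefixOf (c :: rep q.1 q.2 t) = false := by
      intro p hp
      rw [Bool.eq_false_iff]
      intro hpt
      have hpstr := hs p (List.mem_cons_of_mem _ hp)
      obtain ⟨e, ptl, hpe⟩ : ∃ e ptl, p.1 = e :: ptl := by
        cases h1 : p.1 with
        | nil => exact absurd h1 hpstr.1
        | cons e ptl => exact ⟨e, ptl, rfl⟩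
      rw [hpe] at hpt
      obtain ⟨hec, hptl⟩ := (List.cons_prefix_cons).mp (List.isPrefixOf_iff_prefix.mp hpt)
      have hmono : ptl <+: t := by
        refine rep_prefix_mono q.1 q.2 hq.2.1 hq.2.2.2.1 t.length t ptl le_rfl ?_ hptl
        intro x hx
        have := hpstr.2.2.2.2.1
        rw [hpe] at this
        exact this x hx
      have : p.1.isPrefixOf (c :: t) = true := by
        rw [hpe]
        exact List.isPrefixOf_iff_prefix.mpr ((List.cons_prefix_cons).mpr ⟨hec, hmono⟩)
      rw [hnp p (List.mem_cons_of_mem _ hp)] at this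
      exact Bool.false_ne_true this
    calc afold (q :: ps') (c :: t) = afold ps' (rep q.1 q.2 (c :: t)) := rfl
      _ = afold ps' (c :: rep q.1 q.2 t) := by rw [hrepq]
      _ = c :: afold ps' (rep q.1 q.2 t) :=
          ih (rep q.1 q.2 t) (fun p hp => hs p (List.mem_cons_of_mem _ hp)) hnp'
      _ = c :: afold (q :: ps') t := rfl

-- a capital-initial block that mismatches every key passes through the composition
lemma afold_block (ps : List (List Char × List Char)) (c : Char) (u' : List Char)
    (hs : ∀ p ∈ ps, Struct p)
    (hm : ∀ p ∈ ps, mismB p.1 (c :: u') = true)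
    (hcapu : ∀ x ∈ u', isCap x = false) :
    ∀ w, afold ps ((c :: u') ++ w) = (c :: u') ++ afold ps w := by
  induction ps with
  | nil => intro w; rfl
  | cons q ps' ih =>
    intro w
    have hq := hs q (List.mem_cons_self)
    obtain ⟨o, old', hqe⟩ : ∃ o old', q.1 = o :: old' := by
      cases h1 : q.1 with
      | nil => exact absurd h1 hq.1
      | cons o old' => exact ⟨o, old', rfl⟩
    have hocap : isCap o = true := by
      have := hq.2.2.1
      rw [hqe] at this
      simpa using this
    have hnp : q.1.isPrefixOf ((c :: u') ++ w) = false :=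
      not_prefix_of_mismB q.1 (c :: u') w (hm q (List.mem_cons_self))
    have hnp' : ¬ (q.1.isPrefixOf (c :: (u' ++ w)) = true) := by
      rw [List.cons_append] at hnp
      simp [hnp]
    have hrep : rep q.1 q.2 ((c :: u') ++ w) = (c :: u') ++ rep q.1 q.2 w := by
      rw [List.cons_append, rep, if_neg hnp', hqe,
        rep_append_noncap o old' q.2 u' w hocap hcapu, ← hqe]
      simp
    calc afold (q :: ps') ((c :: u') ++ w)
        = afold ps' (rep q.1 q.2 ((c :: u') ++ w)) := rfl
      _ = afold ps' ((c :: u') ++ rep q.1 q.2 w) := by rw [hrep]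
      _ = (c :: u') ++ afold ps' (rep q.1 q.2 w) :=
          ih (fun p hp => hs p (List.mem_cons_of_mem _ hp))
             (fun p hp => hm p (List.mem_cons_of_mem _ hp)) (rep q.1 q.2 w)
      _ = (c :: u') ++ afold (q :: ps') w := rfl

lemma allNoncap {l : List Char} (h : l.all (fun c => !isCap c) = true) :
    ∀ c ∈ l, isCap c = false :=
  fun c hc => by simpa using List.all_eq_true.mp h c hc

set_option maxRecDepth 4096 in
lemma bTable_struct : ∀ p ∈ bTable, Struct p := by
  intro p hp
  unfold Struct
  fin_cases hp <;>
    exact ⟨by decide, by decide, by decide, by decide,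
           allNoncap (by decide), allNoncap (by decide)⟩

set_option maxRecDepth 4096 in
set_option maxHeartbeats 1000000 in
lemma bTable_pw :
    bTable.Pairwise (fun a b => mismB a.1 b.1 = true ∧ mismB b.1 a.2 = true) := by decide

-- main equivalence on character lists
lemma main_eq : ∀ n s, s.length ≤ n → afold bTable s = bGo s := by
  intro n
  induction n with
  | zero =>
    intro s hs
    have : s = [] := List.eq_nil_of_length_eq_zero (Nat.le_zero.mp hs)
    subst this
    rw [afold_nil, bGo]
  | succ n ih =>
    intro s hs
    cases s with
    | nil => rw [afold_nil, bGo]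
    | cons c t =>
      rw [bGo]
      cases h : bTable.find? (fun p => p.1.isPrefixOf (c :: t)) with
      | none =>
        have hnp : ∀ p ∈ bTable, p.1.isPrefixOf (c :: t) = false := by
          intro p hp
          exact Bool.eq_false_iff.mpr (List.find?_eq_none.mp h p hp)
        rw [afold_cons bTable c t bTable_struct hnp, ih t (by simp at hs; omega)]
      | some p =>
        have hmem := List.mem_of_find?_eq_some h
        have hpred : p.1.isPrefixOf (c :: t) = true := by
          have := List.find?_some h
          simpa using this
        have hpstr := bTable_struct p hmem
        obtain ⟨rest, hrest⟩ := List.isPrefixOf_iff_prefix.mp hpred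
        obtain ⟨e, ptl, hpe⟩ : ∃ e ptl, p.1 = e :: ptl := by
          cases h1 : p.1 with
          | nil => exact absurd h1 hpstr.1
          | cons e ptl => exact ⟨e, ptl, rfl⟩
        have htmp := hrest
        rw [hpe, List.cons_append] at htmp
        injection htmp with hec ht'
        have ht : t = ptl ++ rest := ht'.symm
        obtain ⟨T₁, T₂, hT⟩ := List.append_of_mem hmem
        have hpw := bTable_pw
        rw [hT, List.pairwise_append] at hpw
        obtain ⟨pw1, pw2, hcross⟩ := hpw
        have hm₁ : ∀ q ∈ T₁, mismB q.1 p.1 = true :=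
          fun q hq => (hcross q hq p (List.mem_cons_self)).1
        have hm₂ : ∀ q ∈ T₂, mismB q.1 p.2 = true := by
          intro q hq
          exact ((List.pairwise_cons.mp pw2).1 q hq).2
        have hs₁ : ∀ q ∈ T₁, Struct q := by
          intro q hq; exact bTable_struct q (by rw [hT]; exact List.mem_append_left _ hq)
        have hs₂ : ∀ q ∈ T₂, Struct q := by
          intro q hq
          exact bTable_struct q (by rw [hT]; exact List.mem_append_right _ (List.mem_cons_of_mem _ hq))
        obtain ⟨v, vtl, hve⟩ : ∃ v vtl, p.2 = v :: vtl := by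
          cases h1 : p.2 with
          | nil => exact absurd h1 hpstr.2.1
          | cons v vtl => exact ⟨v, vtl, rfl⟩
        have hkey_tail : ∀ x ∈ ptl, isCap x = false := by
          intro x hx
          have := hpstr.2.2.2.2.1
          rw [hpe] at this
          exact this x hx
        have hval_tail : ∀ x ∈ vtl, isCap x = false := by
          intro x hx
          have := hpstr.2.2.2.2.2
          rw [hve] at this
          exact this x hx
        have step1 : afold T₁ (p.1 ++ rest) = p.1 ++ afold T₁ rest := by
          rw [hpe]
          exact afold_block T₁ e ptl hs₁ (fun q hq => hpe ▸ hm₁ q hq) hkey_tail rest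
        have step2 : rep p.1 p.2 (p.1 ++ afold T₁ rest)
            = p.2 ++ rep p.1 p.2 (afold T₁ rest) :=
          rep_self_append p.1 p.2 (afold T₁ rest) hpstr.1
        have step3 : afold T₂ (p.2 ++ rep p.1 p.2 (afold T₁ rest))
            = p.2 ++ afold T₂ (rep p.1 p.2 (afold T₁ rest)) := by
          rw [hve]
          exact afold_block T₂ v vtl hs₂ (fun q hq => hve ▸ hm₂ q hq) hval_tail _
        have hrest_len : rest.length ≤ n := by
          have : (c :: t).length = p.1.length + rest.length := by
            rw [← hrest]; simp
          simp at hs this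
          rw [hpe] at this
          simp at this
          omega
        have hA : afold bTable (c :: t) = p.2 ++ afold bTable rest := by
          rw [hT, ← hrest]
          rw [show (T₁ ++ p :: T₂ : List _) = (T₁ ++ [p]) ++ T₂ by simp]
          rw [afold_append, afold_append, afold_append, afold_append]
          rw [show afold [p] (afold T₁ (p.1 ++ rest)) = rep p.1 p.2 (afold T₁ (p.1 ++ rest)) from rfl]
          rw [show afold [p] (afold T₁ rest) = rep p.1 p.2 (afold T₁ rest) from rfl]
          rw [step1, step2, step3]
        rw [hA, ih rest hrest_len]
        have hdrop : t.drop (p.1.length - 1) = rest := by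
          rw [ht, hpe]
          simp
        change p.2 ++ bGo rest = p.2 ++ bGo (t.drop (p.1.length - 1))
        rw [hdrop]

-- the string-level fold of A equals the character-list fold
lemma foldA (ps : List (String × String)) :
    ∀ s : String, ps.foldl (fun acc p => PySem.Str.replace acc p.1 p.2) s
      = String.ofList (ps.foldl (fun l p => PySem.Chars.replace l p.1.toList p.2.toList) s.toList) := by
  induction ps with
  | nil => intro s; simp
  | cons p ps' ih =>
    intro s
    rw [List.foldl_cons, List.foldl_cons, ih (PySem.Str.replace s p.1 p.2)]
    rw [show PySem.Str.replace s p.1 p.2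
        = String.ofList (PySem.Chars.replace s.toList p.1.toList p.2.toList) from rfl]
    rw [String.toList_ofList]

set_option maxRecDepth 4096 in
set_option maxHeartbeats 1000000 in
lemma aTable_map :
    aTable.map (fun p => (p.1.toList, p.2.toList)) = bTable := by decide

-- ===== VERDICT (by name: the statement is the Claim_ definition above) =====
set_option maxHeartbeats 1000000 in
theorem translate_month_names_de_py_spec : Claim_equal_translate_month_names_de_py := by
  intro formatted _
  show translate_month_names_de_py formatted = translate_month_names_de_py_alt formatted
  have h1 : aTable.foldl (fun l p => PySem.Chars.replace l p.1.toList p.2.toList) formatted.toList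
      = bTable.foldl (fun l q => PySem.Chars.replace l q.1 q.2) formatted.toList := by
    rw [← aTable_map, List.foldl_map]
  have h2 : bTable.foldl (fun l q => PySem.Chars.replace l q.1 q.2) formatted.toList
      = afold bTable formatted.toList := by
    apply PySem.List.foldl_congr_mem
    intro l q hq
    exact replace_eq_rep l q.1 q.2 (bTable_struct q hq).1
  rw [translate_month_names_de_py, translate_month_names_de_py_alt, foldA]
  exact congrArg String.ofList
    (h1.trans (h2.trans (main_eq formatted.toList.length formatted.toList le_rfl)))
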